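-- pv_equiv track=rewrite | github.com/panditamey1/shiny-octo-spork | num2.py | filter_and_merge_sequences
-- ===== SOURCE A (Python) =====
-- from collections import defaultdict
--
-- def filter_and_merge_sequences(all_sequences, user_sequence, min_occurrences):
--     merged_sequences = defaultdict(int)
--     user_seq_len = len(user_sequence)
--
--     # Check sequences starting with the user sequence
--     for (seq_length, seq), count in all_sequences.items():
--         if seq[:user_seq_len] == user_sequence and count >= min_occurrences:
--             merged_sequences[seq] += count
--
--     # Merge longer sequences into shorter ones
--     final_sequences = defaultdict(int)
--     for seq, count in merged_sequences.items():
--         for i in range(len(seq) - user_seq_len + 1):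
--             sub_seq = seq[:user_seq_len + i]
--             final_sequences[sub_seq] += count
--
--     return final_sequences
-- ===== SOURCE B (Python) =====
-- from collections import defaultdict
--
-- def filter_and_merge_sequences(all_sequences, user_sequence, min_occurrences):
--     # Different strategy: instead of accumulating counts into dicts while scanning,
--     # first list the qualifying entries, then enumerate the distinct output prefixes
--     # in first-occurrence order, and compute each prefix's total independently as the
--     # sum of counts of qualifying sequences that start with that prefix.
--     k = len(user_sequence)
--     qualifying = [(seq, count) for (seq_length, seq), count in all_sequences.items()
--                   if seq[:k] == user_sequence and count >= min_occurrences]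
--     ordered_keys = []
--     seen = set()
--     for seq, _ in qualifying:
--         for end in range(k, len(seq) + 1):
--             p = seq[:end]
--             if p not in seen:
--                 seen.add(p)
--                 ordered_keys.append(p)
--     result = defaultdict(int)
--     for p in ordered_keys:
--         result[p] = sum(c for s, c in qualifying if s[:len(p)] == p)
--     return result
-- ===== Notes on version B (the rewrite author's own statement) =====
-- stated objective: alternative
-- what changed: Instead of A's two incremental dict-accumulation passes (merge counts per sequence, then spread each merged count over its prefixes), B filters once, enumerates the distinct output prefixes in first-occurrence order with a seen-set, and computes each prefix's value independently as a startswith-sum over the qualifying entries.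
import Mathlib
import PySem

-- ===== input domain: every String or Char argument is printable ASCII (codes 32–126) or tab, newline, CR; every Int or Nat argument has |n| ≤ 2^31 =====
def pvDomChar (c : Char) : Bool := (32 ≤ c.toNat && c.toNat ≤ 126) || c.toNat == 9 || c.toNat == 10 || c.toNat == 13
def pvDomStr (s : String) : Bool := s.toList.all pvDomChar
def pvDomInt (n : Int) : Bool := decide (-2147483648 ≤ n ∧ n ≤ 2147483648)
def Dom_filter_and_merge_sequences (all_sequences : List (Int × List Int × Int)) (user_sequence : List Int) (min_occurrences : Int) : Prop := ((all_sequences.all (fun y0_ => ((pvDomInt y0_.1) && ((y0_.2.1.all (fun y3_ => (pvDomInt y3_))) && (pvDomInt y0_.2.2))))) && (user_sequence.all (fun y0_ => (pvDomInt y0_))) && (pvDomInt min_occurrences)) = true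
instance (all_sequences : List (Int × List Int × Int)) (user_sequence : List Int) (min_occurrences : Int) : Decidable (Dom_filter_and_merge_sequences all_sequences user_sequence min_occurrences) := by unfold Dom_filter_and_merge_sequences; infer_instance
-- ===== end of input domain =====

-- B replaces A's two incremental dict-accumulation passes by: filter once, enumerate the distinct
-- output prefixes in first-occurrence order with a seen-set, then compute each prefix's value
-- independently as a startswith-sum over the qualifying entries (objective: alternative).


-- ===== PORT A =====
def filter_and_merge_sequences (all_sequences : List (Int × List Int × Int)) (user_sequence : List Int) (min_occurrences : Int) : List (List Int × Int) :=
  let user_seq_len : Int := user_sequence.length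
  -- for (seq_length, seq), count in all_sequences.items(): merged_sequences[seq] += count
  let merged : PySem.Dict (List Int) Int :=
    all_sequences.foldl (fun m e =>
      if PySem.List.slice e.2.1 none (some user_seq_len) = user_sequence ∧ min_occurrences ≤ e.2.2 then
        m.modify e.2.1 0 (· + e.2.2)
      else m) PySem.Dict.empty
  -- for seq, count in merged_sequences.items(): for i in range(len(seq)-user_seq_len+1): final[seq[:user_seq_len+i]] += count
  let final : PySem.Dict (List Int) Int :=
    merged.items.foldl (fun f sc =>
      (PySem.List.pyRange 0 ((sc.1.length : Int) - user_seq_len + 1) 1).foldl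
        (fun f i => f.modify (PySem.List.slice sc.1 none (some (user_seq_len + i))) 0 (· + sc.2)) f)
      PySem.Dict.empty
  final.items

-- ===== PORT B =====
def filter_and_merge_sequences_alt (all_sequences : List (Int × List Int × Int)) (user_sequence : List Int) (min_occurrences : Int) : List (List Int × Int) :=
  let k : Int := user_sequence.length
  -- qualifying = [(seq, count) for (seq_length, seq), count in all_sequences.items() if ...]
  let qualifying : List (List Int × Int) :=
    (all_sequences.filter (fun e =>
      decide (PySem.List.slice e.2.1 none (some k) = user_sequence ∧ min_occurrences ≤ e.2.2))).map
      (fun e => (e.2.1, e.2.2))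
  -- ordered_keys / seen: distinct prefixes in first-occurrence order
  let ordered : List (List Int) :=
    (qualifying.foldl (fun (acc : List (List Int) × PySem.Set (List Int)) sc =>
        (PySem.List.pyRange k ((sc.1.length : Int) + 1) 1).foldl (fun acc en =>
          let p := PySem.List.slice sc.1 none (some en)
          if PySem.Set.contains acc.2 p then acc else (acc.1 ++ [p], PySem.Set.add acc.2 p)) acc)
      ([], PySem.Set.ofList [])).1
  -- result[p] = sum(c for s, c in qualifying if s[:len(p)] == p)
  (ordered.foldl (fun d p =>
      d.insert p (qualifying.foldl (fun s sc =>
        if PySem.List.slice sc.1 none (some ((p.length : Int))) = p then s + sc.2 else s) 0))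
    PySem.Dict.empty).items

-- ===== PRECONDITION & SPEC =====
def Spec_filter_and_merge_sequences (all_sequences : List (Int × List Int × Int)) (user_sequence : List Int) (min_occurrences : Int) (out : List (List Int × Int)) : Prop := out = filter_and_merge_sequences_alt all_sequences user_sequence min_occurrences
instance (all_sequences : List (Int × List Int × Int)) (user_sequence : List Int) (min_occurrences : Int) (out : List (List Int × Int)) : Decidable (Spec_filter_and_merge_sequences all_sequences user_sequence min_occurrences out) := by unfold Spec_filter_and_merge_sequences; infer_instance

-- ===== CLAIM (what is proved, stated in full; the proofs are below) =====
def Claim_equal_filter_and_merge_sequences : Prop := ∀ (all_sequences : List (Int × List Int × Int)) (user_sequence : List Int) (min_occurrences : Int), Dom_filter_and_merge_sequences all_sequences user_sequence min_occurrences → Spec_filter_and_merge_sequences all_sequences user_sequence min_occurrences (filter_and_merge_sequences all_sequences user_sequence min_occurrences)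

-- ===== LEMMAS AND PROOFS =====

-- abbreviations for the loop bodies, at the level of the underlying item lists
def pvAdd (g : PySem.Dict (List Int) Int) (p : List Int) (c : Int) : PySem.Dict (List Int) Int :=
  g.modify p 0 (· + c)
def pvAddP (g : PySem.Dict (List Int) Int) (ps : List (List Int)) (c : Int) : PySem.Dict (List Int) Int :=
  ps.foldl (fun g p => pvAdd g p c) g
def pvPref (q : Int) (s : List Int) : List (List Int) :=
  (PySem.List.pyRange q ((s.length : Int) + 1) 1).map (fun e => PySem.List.slice s none (some e))
-- items-level effect of `pvAdd` on a dict with duplicate-free keys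
def pvListAdd (ms : List (List Int × Int)) (s : List Int) (c : Int) : List (List Int × Int) :=
  match ms with
  | [] => [(s, 0 + c)]
  | (a, b) :: t => if a = s then (a, b + c) :: t else (a, b) :: pvListAdd t s c
def pvExpand (q : Int) (ms : List (List Int × Int)) (f : PySem.Dict (List Int) Int) : PySem.Dict (List Int) Int :=
  ms.foldl (fun f sc => pvAddP f (pvPref q sc.1) sc.2) f
def pvFuse (q : Int) (U : List Int) (M : Int) (l : List (Int × List Int × Int)) (f : PySem.Dict (List Int) Int) : PySem.Dict (List Int) Int :=
  l.foldl (fun f e =>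
    if PySem.List.slice e.2.1 none (some q) = U ∧ M ≤ e.2.2 then pvAddP f (pvPref q e.2.1) e.2.2 else f) f
def pvBuild (q : Int) (U : List Int) (M : Int) (l : List (Int × List Int × Int)) (m : PySem.Dict (List Int) Int) : PySem.Dict (List Int) Int :=
  l.foldl (fun m e =>
    if PySem.List.slice e.2.1 none (some q) = U ∧ M ≤ e.2.2 then pvAdd m e.2.1 e.2.2 else m) m
-- B-side abstractions: qualifying entries, the flattened (prefix, count) stream,
-- first-occurrence new keys, per-key totals, B's per-key value
def pvQ (q : Int) (U : List Int) (M : Int) (l : List (Int × List Int × Int)) : List (List Int × Int) :=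
  (l.filter (fun e => decide (PySem.List.slice e.2.1 none (some q) = U ∧ M ≤ e.2.2))).map
    (fun e => (e.2.1, e.2.2))
def pvStream (q : Int) (qual : List (List Int × Int)) : List (List Int × Int) :=
  qual.flatMap (fun sc => (pvPref q sc.1).map (fun p => (p, sc.2)))
def pvNew : List (List Int) → List (List Int × Int) → List (List Int)
  | _, [] => []
  | seen, pc :: t => if pc.1 ∈ seen then pvNew seen t else pc.1 :: pvNew (pc.1 :: seen) t
def pvTot (st : List (List Int × Int)) (p : List Int) : Int :=
  st.foldl (fun s pc => s + (if pc.1 = p then pc.2 else 0)) 0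
def pvVal (qual : List (List Int × Int)) (p : List Int) : Int :=
  qual.foldl (fun s sc =>
    if PySem.List.slice sc.1 none (some ((p.length : Int))) = p then s + sc.2 else s) 0

lemma pvRange_shift (a b : Int) :
    PySem.List.pyRange a b 1 = (PySem.List.pyRange 0 (b - a) 1).map (fun k => a + k) := by
  simp only [PySem.List.pyRange, one_ne_zero, if_false, List.map_map, Int.ediv_one]
  rw [if_congr (show (a < b) ↔ (0 < b - a) by omega) rfl rfl]
  split_ifs with h0 h <;> first
  | rfl
  | (exfalso; omega)
  | (rw [show b - a - 0 + 1 - 1 = b - a + 1 - 1 by ring]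
     exact List.map_congr_left (fun x _ => by simp))

lemma pv_ins_ins_same (d : PySem.Dict (List Int) Int) (k : List Int) (v w : Int) :
    (d.insert k v).insert k w = d.insert k w := by
  apply PySem.Dict.ext
  rw [PySem.Dict.items_insert, PySem.Dict.items_insert, PySem.Dict.items_insert]
  by_cases h : d.contains k
  · simp [h, List.map_map]
    intro a b _
    by_cases hp : a = k <;> simp [hp]
  · have hall : ∀ p ∈ d.items, p.1 ≠ k := by
      intro p hp hpk
      refine h ?_
      unfold PySem.Dict.contains
      rw [List.any_eq_true]
      exact ⟨p, hp, by simpa using hpk⟩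
    simp [h, List.map_append]
    have h2 : ∀ p ∈ d.items, (if p.1 = k then (k, w) else p) = p := fun p hp => by
      simp [hall p hp]
    rw [List.map_congr_left h2]
    simp

lemma pv_ins_ins_comm (d : PySem.Dict (List Int) Int) (p q : List Int) (v w : Int)
    (hp : d.contains p = true) (hpq : p ≠ q) :
    (d.insert p v).insert q w = (d.insert q w).insert p v := by
  apply PySem.Dict.ext
  rw [PySem.Dict.items_insert, PySem.Dict.items_insert, PySem.Dict.items_insert, PySem.Dict.items_insert]
  have hqp : q ≠ p := Ne.symm hpq
  by_cases hq : d.contains q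
  · simp [hp, hq, PySem.Dict.contains_insert, List.map_map]
    intro a b _
    by_cases h1 : a = p
    · simp [h1, hpq]
    · by_cases h2 : a = q <;> simp [h1, h2, hqp]
  · simp [hp, hq, PySem.Dict.contains_insert, hqp, List.map_append]

lemma pv_add_contains (g : PySem.Dict (List Int) Int) (k p : List Int) (c : Int)
    (h : g.contains p = true) : (pvAdd g k c).contains p = true := by
  unfold pvAdd
  rw [PySem.Dict.contains_modify]
  simp [h]

lemma pv_add_add_same (g : PySem.Dict (List Int) Int) (p : List Int) (b c : Int) :
    pvAdd (pvAdd g p b) p c = pvAdd g p (b + c) := by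
  unfold pvAdd PySem.Dict.modify
  rw [PySem.Dict.getD_insert_self, pv_ins_ins_same]
  ring_nf

lemma pv_add_comm (g : PySem.Dict (List Int) Int) (p q : List Int) (c b : Int)
    (hp : g.contains p = true) :
    pvAdd (pvAdd g p c) q b = pvAdd (pvAdd g q b) p c := by
  by_cases hpq : p = q
  · subst hpq
    rw [pv_add_add_same, pv_add_add_same]
    ring_nf
  · unfold pvAdd PySem.Dict.modify
    rw [PySem.Dict.getD_insert (d := g), PySem.Dict.getD_insert (d := g)]
    simp [hpq, Ne.symm hpq]
    exact pv_ins_ins_comm g p q _ _ hp hpq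

lemma pv_addP_contains (g : PySem.Dict (List Int) Int) (ps : List (List Int)) (p : List Int) (c : Int)
    (h : g.contains p = true) : (pvAddP g ps c).contains p = true := by
  induction ps generalizing g with
  | nil => exact h
  | cons a t ih => exact ih _ (pv_add_contains _ _ _ _ h)

lemma pv_mem_addP_contains (g : PySem.Dict (List Int) Int) (ps : List (List Int)) (p : List Int) (c : Int)
    (h : p ∈ ps) : (pvAddP g ps c).contains p = true := by
  induction ps generalizing g with
  | nil => simp at h
  | cons a t ih =>
    rcases List.mem_cons.mp h with h | h
    · have hh : (pvAdd g a c).contains p = true := by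
        subst h; unfold pvAdd; rw [PySem.Dict.contains_modify]; simp
      exact pv_addP_contains (pvAdd g a c) t p c hh
    · exact ih _ h

lemma pv_add_addP_comm (g : PySem.Dict (List Int) Int) (p : List Int) (qs : List (List Int)) (c b : Int)
    (hp : g.contains p = true) :
    pvAddP (pvAdd g p c) qs b = pvAdd (pvAddP g qs b) p c := by
  induction qs generalizing g with
  | nil => rfl
  | cons a t ih =>
    show pvAddP (pvAdd (pvAdd g p c) a b) t b = pvAdd (pvAddP (pvAdd g a b) t b) p c
    rw [pv_add_comm _ _ _ _ _ hp, ih _ (pv_add_contains _ _ _ _ hp)]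

lemma pv_addP_addP_comm (g : PySem.Dict (List Int) Int) (ps qs : List (List Int)) (c b : Int)
    (hp : ∀ p ∈ ps, g.contains p = true) :
    pvAddP (pvAddP g ps c) qs b = pvAddP (pvAddP g qs b) ps c := by
  induction ps generalizing g with
  | nil => rfl
  | cons a t ih =>
    show pvAddP (pvAddP (pvAdd g a c) t c) qs b = pvAddP (pvAddP g qs b) (a :: t) c
    rw [ih _ (fun p hp' => pv_add_contains _ _ _ _ (hp p (List.mem_cons_of_mem a hp')))]
    show pvAddP (pvAddP (pvAdd g a c) qs b) t c = pvAddP (pvAdd (pvAddP g qs b) a c) t c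
    rw [pv_add_addP_comm _ _ _ _ _ (hp a (List.mem_cons_self))]

lemma pv_addP_pull (q : Int) (t : List (List Int × Int)) (g : PySem.Dict (List Int) Int)
    (ps : List (List Int)) (c : Int) (hp : ∀ p ∈ ps, g.contains p = true) :
    pvExpand q t (pvAddP g ps c) = pvAddP (pvExpand q t g) ps c := by
  induction t generalizing g with
  | nil => rfl
  | cons sc t ih =>
    show pvExpand q t (pvAddP (pvAddP g ps c) (pvPref q sc.1) sc.2) = pvAddP (pvExpand q t (pvAddP g (pvPref q sc.1) sc.2)) ps c
    rw [pv_addP_addP_comm _ _ _ _ _ hp]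
    exact ih _ (fun p hp' => pv_addP_contains _ _ _ _ (hp p hp'))

lemma pv_addP_twice (g : PySem.Dict (List Int) Int) (ps : List (List Int)) (b c : Int) :
    pvAddP g ps (b + c) = pvAddP (pvAddP g ps b) ps c := by
  induction ps generalizing g with
  | nil => rfl
  | cons a t ih =>
    show pvAddP (pvAdd g a (b + c)) t (b + c) = pvAddP (pvAdd (pvAddP (pvAdd g a b) t b) a c) t c
    rw [← pv_add_addP_comm _ _ _ _ _ (by unfold pvAdd; rw [PySem.Dict.contains_modify]; simp),
        pv_add_add_same, ih]

lemma pv_modify_items (ms : List (List Int × Int)) (s : List Int) (c : Int)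
    (h : (ms.map Prod.fst).Nodup) :
    ((PySem.Dict.mk ms).modify s 0 (· + c)).items = pvListAdd ms s c := by
  induction ms with
  | nil => rfl
  | cons ab t ih =>
    obtain ⟨a, b⟩ := ab
    have hn : (t.map Prod.fst).Nodup := (List.nodup_cons.mp h).2
    have hna : a ∉ t.map Prod.fst := (List.nodup_cons.mp h).1
    unfold PySem.Dict.modify PySem.Dict.insert
    by_cases has : a = s
    · subst has
      have hc : (PySem.Dict.mk ((a, b) :: t)).contains a = true := by
        simp [PySem.Dict.contains]
      have hg : (PySem.Dict.mk ((a, b) :: t)).getD a 0 = b := by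
        simp [PySem.Dict.getD, PySem.Dict.get?]
      rw [hg]
      simp only [hc, if_pos, pvListAdd]
      simp only [List.map_cons, BEq.rfl, if_pos]
      congr 1
      have h2 : ∀ p ∈ t, (if (p.1 == a) = true then (a, b + c) else p) = p := by
        intro p hp
        have hne : p.1 ≠ a := fun hh => hna (hh ▸ List.mem_map_of_mem hp)
        simp [hne]
      rw [List.map_congr_left h2]
      simp
    · have hfind : (List.find? (fun p => p.1 == s) ((a, b) :: t)) = List.find? (fun p => p.1 == s) t := by
        rw [List.find?_cons_of_neg]
        simpa using has
      have hcont : (PySem.Dict.mk ((a, b) :: t)).contains s = (PySem.Dict.mk t).contains s := by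
        simp [PySem.Dict.contains, has]
      have hg : (PySem.Dict.mk ((a, b) :: t)).getD s 0 = (PySem.Dict.mk t).getD s 0 := by
        simp [PySem.Dict.getD, PySem.Dict.get?, hfind]
      rw [hcont, hg]
      by_cases hc : (PySem.Dict.mk t).contains s = true
      · simp only [hc, if_pos]
        simp only [List.map_cons]
        have : ((a, b).1 == s) = false := by simpa using has
        rw [this]
        simp only [Bool.false_eq_true, pvListAdd, if_neg has]
        congr 1
        have := ih hn
        unfold PySem.Dict.modify PySem.Dict.insert at this
        simpa [hc] using this
      · simp only [hc]
        simp only [Bool.false_eq_true, pvListAdd, if_neg has, List.cons_append]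
        congr 1
        have := ih hn
        unfold PySem.Dict.modify PySem.Dict.insert at this
        simpa [hc] using this

lemma pv_expand_listAdd (q : Int) (ms : List (List Int × Int)) (f : PySem.Dict (List Int) Int)
    (s : List Int) (c : Int) :
    pvExpand q (pvListAdd ms s c) f = pvAddP (pvExpand q ms f) (pvPref q s) c := by
  induction ms generalizing f with
  | nil =>
    show pvAddP f (pvPref q s) (0 + c) = pvAddP (pvExpand q [] f) (pvPref q s) c
    rw [zero_add]; rfl
  | cons ab t ih =>
    obtain ⟨a, b⟩ := ab
    by_cases has : a = s
    · subst has
      rw [show pvListAdd ((a, b) :: t) a c = (a, b + c) :: t from by simp [pvListAdd]]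
      show pvExpand q t (pvAddP f (pvPref q a) (b + c)) = pvAddP (pvExpand q t (pvAddP f (pvPref q a) b)) (pvPref q a) c
      rw [pv_addP_twice, pv_addP_pull _ _ _ _ _ (fun p hp => pv_mem_addP_contains _ _ _ _ hp)]
    · rw [show pvListAdd ((a, b) :: t) s c = (a, b) :: pvListAdd t s c from by simp [pvListAdd, has]]
      show pvExpand q (pvListAdd t s c) (pvAddP f (pvPref q a) b) = pvAddP (pvExpand q t (pvAddP f (pvPref q a) b)) (pvPref q s) c
      exact ih _

lemma pv_main (q : Int) (U : List Int) (M : Int) (l : List (Int × List Int × Int))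
    (m : PySem.Dict (List Int) Int) (f : PySem.Dict (List Int) Int) (h : m.keys.Nodup) :
    pvExpand q (pvBuild q U M l m).items f = pvFuse q U M l (pvExpand q m.items f) := by
  induction l generalizing m f with
  | nil => rfl
  | cons e t ih =>
    by_cases hc : (PySem.List.slice e.2.1 none (some q) = U ∧ M ≤ e.2.2)
    · rw [show pvBuild q U M (e :: t) m = pvBuild q U M t (pvAdd m e.2.1 e.2.2) from by
          simp only [pvBuild, List.foldl_cons, if_pos hc],
        show pvFuse q U M (e :: t) (pvExpand q m.items f)
            = pvFuse q U M t (pvAddP (pvExpand q m.items f) (pvPref q e.2.1) e.2.2) from by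
          simp only [pvFuse, List.foldl_cons, if_pos hc]]
      rw [ih _ _ (by unfold pvAdd PySem.Dict.modify; exact PySem.Dict.nodup_keys_insert _ _ _ h)]
      congr 1
      have hitems : (pvAdd m e.2.1 e.2.2).items = pvListAdd m.items e.2.1 e.2.2 := by
        unfold pvAdd
        exact pv_modify_items _ _ _ (by simpa [PySem.Dict.keys] using h)
      rw [hitems, pv_expand_listAdd]
    · rw [show pvBuild q U M (e :: t) m = pvBuild q U M t m from by
          simp only [pvBuild, List.foldl_cons, if_neg hc],
        show pvFuse q U M (e :: t) (pvExpand q m.items f) = pvFuse q U M t (pvExpand q m.items f) from by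
          simp only [pvFuse, List.foldl_cons, if_neg hc]]
      exact ih _ _ h

lemma pv_addP_eq_portA_inner (q : Int) (s : List Int) (c : Int) (f : PySem.Dict (List Int) Int) :
    pvAddP f (pvPref q s) c =
      (PySem.List.pyRange 0 ((s.length : Int) - q + 1) 1).foldl
        (fun f i => f.modify (PySem.List.slice s none (some (q + i))) 0 (· + c)) f := by
  unfold pvAddP pvPref
  rw [List.foldl_map, pvRange_shift q ((s.length : Int) + 1)]
  rw [List.foldl_map]
  have : (s.length : Int) + 1 - q = (s.length : Int) - q + 1 := by ring
  rw [this]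
  rfl

-- ---- totals ----
lemma pvTot_eq_sum (st : List (List Int × Int)) (p : List Int) :
    pvTot st p = (st.map (fun pc => if pc.1 = p then pc.2 else 0)).sum := by
  unfold pvTot
  rw [PySem.List.foldl_add]
  simp

lemma pvTot_cons (pc : List Int × Int) (t : List (List Int × Int)) (p : List Int) :
    pvTot (pc :: t) p = (if pc.1 = p then pc.2 else 0) + pvTot t p := by
  simp [pvTot_eq_sum]

lemma pvTot_append (xs ys : List (List Int × Int)) (p : List Int) :
    pvTot (xs ++ ys) p = pvTot xs p + pvTot ys p := by
  simp [pvTot_eq_sum]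

lemma pvTot_map_const_notmem (xs : List (List Int)) (c : Int) (p : List Int) (h : p ∉ xs) :
    pvTot (xs.map (fun x => (x, c))) p = 0 := by
  induction xs with
  | nil => simp [pvTot_eq_sum]
  | cons a t ih =>
    rw [List.map_cons, pvTot_cons]
    have hne : a ≠ p := fun hh => h (hh ▸ List.mem_cons_self)
    rw [ih (fun hh => h (List.mem_cons_of_mem a hh))]
    simp [hne]

lemma pvTot_map_const (xs : List (List Int)) (c : Int) (p : List Int) (h : xs.Nodup) :
    pvTot (xs.map (fun x => (x, c))) p = if p ∈ xs then c else 0 := by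
  induction xs with
  | nil => simp [pvTot_eq_sum]
  | cons a t ih =>
    rw [List.map_cons, pvTot_cons]
    by_cases hap : a = p
    · subst hap
      rw [pvTot_map_const_notmem t c a (List.nodup_cons.mp h).1]
      simp
    · rw [ih (List.nodup_cons.mp h).2]
      simp [hap, Ne.symm hap]

-- ---- prefixes ----
lemma pv_mem_pvPref {q : Int} (hq : 0 ≤ q) (s p : List Int) :
    p ∈ pvPref q s ↔ q ≤ (p.length : Int) ∧ PySem.List.slice s none (some ((p.length : Int))) = p := by
  unfold pvPref
  rw [List.mem_map]
  constructor
  · rintro ⟨en, hen, rfl⟩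
    rw [PySem.List.mem_pyRange_one] at hen
    have h0 : 0 ≤ en := le_trans hq hen.1
    have hlen : ((PySem.List.slice s none (some en)).length : Int) = en := by
      rw [PySem.List.slice_to s h0, List.length_take]
      omega
    rw [hlen]
    exact ⟨hen.1, rfl⟩
  · rintro ⟨h1, h2⟩
    refine ⟨(p.length : Int), ?_, h2⟩
    rw [PySem.List.mem_pyRange_one]
    refine ⟨h1, ?_⟩
    have := congrArg List.length h2
    rw [PySem.List.slice_to s (by positivity), List.length_take] at this
    omega

lemma pv_nodup_pvPref {q : Int} (hq : 0 ≤ q) (s : List Int) : (pvPref q s).Nodup := by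
  unfold pvPref
  refine List.Nodup.map_on ?_ (PySem.List.nodup_pyRange_one q _)
  intro x hx y hy hxy
  rw [PySem.List.mem_pyRange_one] at hx hy
  have hx0 : 0 ≤ x := le_trans hq hx.1
  have hy0 : 0 ≤ y := le_trans hq hy.1
  have := congrArg List.length hxy
  rw [PySem.List.slice_to s hx0, PySem.List.slice_to s hy0, List.length_take, List.length_take] at this
  omega

lemma pvTot_stream (q : Int) (hq : 0 ≤ q) (qual : List (List Int × Int)) (p : List Int)
    (hp : q ≤ (p.length : Int)) :
    pvTot (pvStream q qual) p
      = (qual.map (fun sc =>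
          if PySem.List.slice sc.1 none (some ((p.length : Int))) = p then sc.2 else 0)).sum := by
  induction qual with
  | nil => simp [pvStream, pvTot_eq_sum]
  | cons sc t ih =>
    rw [show pvStream q (sc :: t) = (pvPref q sc.1).map (fun x => (x, sc.2)) ++ pvStream q t from by
        simp [pvStream]]
    rw [pvTot_append, pvTot_map_const _ _ _ (pv_nodup_pvPref hq sc.1), ih,
      List.map_cons, List.sum_cons]
    congr 1
    rw [if_congr ((pv_mem_pvPref hq sc.1 p).trans (and_iff_right hp)) rfl rfl]

-- ---- first-occurrence keys ----
lemma pv_mem_new {seen : List (List Int)} {st : List (List Int × Int)} {p : List Int}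
    (h : p ∈ pvNew seen st) : p ∉ seen := by
  induction st generalizing seen with
  | nil => simp [pvNew] at h
  | cons pc t ih =>
    by_cases hm : pc.1 ∈ seen
    · rw [show pvNew seen (pc :: t) = pvNew seen t from by simp [pvNew, hm]] at h
      exact ih h
    · rw [show pvNew seen (pc :: t) = pc.1 :: pvNew (pc.1 :: seen) t from by simp [pvNew, hm]] at h
      rcases List.mem_cons.mp h with h | h
      · exact h ▸ hm
      · exact fun hh => ih h (List.mem_cons_of_mem _ hh)

lemma pv_mem_new_fst {seen : List (List Int)} {st : List (List Int × Int)} {p : List Int}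
    (h : p ∈ pvNew seen st) : p ∈ st.map Prod.fst := by
  induction st generalizing seen with
  | nil => simp [pvNew] at h
  | cons pc t ih =>
    by_cases hm : pc.1 ∈ seen
    · rw [show pvNew seen (pc :: t) = pvNew seen t from by simp [pvNew, hm]] at h
      exact List.mem_cons_of_mem _ (ih h)
    · rw [show pvNew seen (pc :: t) = pc.1 :: pvNew (pc.1 :: seen) t from by simp [pvNew, hm]] at h
      rcases List.mem_cons.mp h with h | h
      · exact h ▸ List.mem_cons_self
      · exact List.mem_cons_of_mem _ (ih h)

lemma pv_new_congr {seen seen' : List (List Int)} (st : List (List Int × Int))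
    (h : ∀ x, x ∈ seen ↔ x ∈ seen') : pvNew seen st = pvNew seen' st := by
  induction st generalizing seen seen' with
  | nil => rfl
  | cons pc t ih =>
    by_cases hm : pc.1 ∈ seen
    · rw [show pvNew seen (pc :: t) = pvNew seen t from by simp [pvNew, hm],
        show pvNew seen' (pc :: t) = pvNew seen' t from by simp [pvNew, (h pc.1).mp hm]]
      exact ih h
    · have hm' : pc.1 ∉ seen' := fun hh => hm ((h pc.1).mpr hh)
      rw [show pvNew seen (pc :: t) = pc.1 :: pvNew (pc.1 :: seen) t from by simp [pvNew, hm],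
        show pvNew seen' (pc :: t) = pc.1 :: pvNew (pc.1 :: seen') t from by simp [pvNew, hm']]
      congr 1
      exact ih (fun x => by simp [h x])

lemma pv_new_nodup (seen : List (List Int)) (st : List (List Int × Int)) :
    (pvNew seen st).Nodup := by
  induction st generalizing seen with
  | nil => simp [pvNew]
  | cons pc t ih =>
    by_cases hm : pc.1 ∈ seen
    · rw [show pvNew seen (pc :: t) = pvNew seen t from by simp [pvNew, hm]]
      exact ih seen
    · rw [show pvNew seen (pc :: t) = pc.1 :: pvNew (pc.1 :: seen) t from by simp [pvNew, hm]]
      refine List.nodup_cons.mpr ⟨fun hh => ?_, ih _⟩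
      exact pv_mem_new hh List.mem_cons_self

lemma pvListAdd_not_mem (ms : List (List Int × Int)) (p : List Int) (c : Int)
    (h : p ∉ ms.map Prod.fst) : pvListAdd ms p c = ms ++ [(p, 0 + c)] := by
  induction ms with
  | nil => rfl
  | cons ab t ih =>
    obtain ⟨a, b⟩ := ab
    have hne : a ≠ p := fun hh => h (hh ▸ List.mem_cons_self)
    rw [show pvListAdd ((a, b) :: t) p c = (a, b) :: pvListAdd t p c from by simp [pvListAdd, hne]]
    rw [ih (fun hh => h (List.mem_cons_of_mem _ hh))]
    rfl

lemma pvListAdd_map (ms : List (List Int × Int)) (p : List Int) (c : Int)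
    (t : List (List Int × Int)) (hnd : (ms.map Prod.fst).Nodup) (hmem : p ∈ ms.map Prod.fst) :
    (pvListAdd ms p c).map (fun ab => (ab.1, ab.2 + pvTot t ab.1))
      = ms.map (fun ab => (ab.1, ab.2 + pvTot ((p, c) :: t) ab.1)) := by
  induction ms with
  | nil => simp at hmem
  | cons ab r ih =>
    obtain ⟨a, b⟩ := ab
    have hr : (r.map Prod.fst).Nodup := (List.nodup_cons.mp hnd).2
    have ha : a ∉ r.map Prod.fst := (List.nodup_cons.mp hnd).1
    by_cases hap : a = p
    · subst hap
      rw [show pvListAdd ((a, b) :: r) a c = (a, b + c) :: r from by simp [pvListAdd]]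
      rw [List.map_cons, List.map_cons]
      congr 1
      · rw [pvTot_cons]
        simp [add_assoc]
      · apply List.map_congr_left
        intro x hx
        have hne : a ≠ x.1 := fun hh => ha (hh ▸ List.mem_map_of_mem hx)
        rw [pvTot_cons]
        simp [hne]
    · have hmem' : p ∈ r.map Prod.fst := by
        rw [List.map_cons] at hmem
        rcases List.mem_cons.mp hmem with h | h
        · exact absurd h.symm hap
        · exact h
      rw [show pvListAdd ((a, b) :: r) p c = (a, b) :: pvListAdd r p c from by
          simp [pvListAdd, hap]]
      rw [List.map_cons, List.map_cons, ih hr hmem']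
      congr 1
      rw [pvTot_cons]
      simp [Ne.symm hap]

-- ---- characterization of the stream fold ----
lemma pv_char (st : List (List Int × Int)) (d : PySem.Dict (List Int) Int) (h : d.keys.Nodup) :
    (st.foldl (fun d pc => pvAdd d pc.1 pc.2) d).items
      = d.items.map (fun ab => (ab.1, ab.2 + pvTot st ab.1))
        ++ (pvNew d.keys st).map (fun p => (p, pvTot st p)) := by
  induction st generalizing d with
  | nil =>
    simp [pvNew, pvTot_eq_sum]
  | cons pc t ih =>
    rw [List.foldl_cons]
    have hnd' : (pvAdd d pc.1 pc.2).keys.Nodup := by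
      unfold pvAdd PySem.Dict.modify
      exact PySem.Dict.nodup_keys_insert _ _ _ h
    rw [ih _ hnd']
    have hitems : (pvAdd d pc.1 pc.2).items = pvListAdd d.items pc.1 pc.2 := by
      unfold pvAdd
      exact pv_modify_items _ _ _ (by simpa [PySem.Dict.keys] using h)
    by_cases hc : pc.1 ∈ d.keys
    · have hcont : d.contains pc.1 = true := (PySem.Dict.contains_iff_mem_keys _ _).mpr hc
      have hkeys : (pvAdd d pc.1 pc.2).keys = d.keys := by
        unfold pvAdd
        rw [PySem.Dict.keys_modify, PySem.Dict.keys_insert_of_contains _ _ hcont]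
      rw [hitems, hkeys,
        pvListAdd_map d.items pc.1 pc.2 t (by simpa [PySem.Dict.keys] using h)
          (by simpa [PySem.Dict.keys] using hc),
        show pvNew d.keys (pc :: t) = pvNew d.keys t from by simp [pvNew, hc]]
      congr 1
      apply List.map_congr_left
      intro p hp
      have hne : pc.1 ≠ p := fun hh => pv_mem_new hp (hh ▸ hc)
      rw [pvTot_cons]
      simp [hne]
    · have hcont : d.contains pc.1 = false := by
        rw [← Bool.not_eq_true]
        exact fun hh => hc ((PySem.Dict.contains_iff_mem_keys _ _).mp hh)
      have hkeys : (pvAdd d pc.1 pc.2).keys = d.keys ++ [pc.1] := by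
        unfold pvAdd
        rw [PySem.Dict.keys_modify, PySem.Dict.keys_insert_of_not_contains _ _ hcont]
      rw [hitems, hkeys,
        pvListAdd_not_mem d.items pc.1 pc.2 (by simpa [PySem.Dict.keys] using hc),
        List.map_append,
        pv_new_congr t (show ∀ x, x ∈ d.keys ++ [pc.1] ↔ x ∈ pc.1 :: d.keys from by
          intro x; simp [or_comm]),
        show pvNew d.keys (pc :: t) = pc.1 :: pvNew (pc.1 :: d.keys) t from by simp [pvNew, hc],
        List.append_assoc]
      congr 1
      · apply List.map_congr_left
        intro ab hab
        have hmem : ab.1 ∈ d.keys := by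
          simp only [PySem.Dict.keys]
          exact List.mem_map_of_mem hab
        have hne : pc.1 ≠ ab.1 := fun hh => hc (hh ▸ hmem)
        rw [pvTot_cons]
        simp [hne]
      · simp only [List.map_cons, List.map_nil, List.singleton_append]
        congr 1
        · show (pc.1, 0 + pc.2 + pvTot t pc.1) = (pc.1, pvTot (pc :: t) pc.1)
          rw [pvTot_cons]
          simp
        · apply List.map_congr_left
          intro p hp
          have hne : pc.1 ≠ p := fun hh => pv_mem_new hp (hh ▸ List.mem_cons_self)
          rw [pvTot_cons]
          simp [hne]

-- ---- bridging both ports to the stream fold / the new-keys + totals form ----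
lemma pv_fuse_stream (q : Int) (U : List Int) (M : Int) (l : List (Int × List Int × Int)) :
    pvFuse q U M l PySem.Dict.empty
      = (pvStream q (pvQ q U M l)).foldl (fun d pc => pvAdd d pc.1 pc.2) PySem.Dict.empty := by
  unfold pvStream pvQ pvFuse
  rw [List.foldl_flatMap, List.foldl_map, List.foldl_filter]
  apply List.foldl_ext
  intro d e _
  simp only [decide_eq_true_eq]
  split_ifs with h
  · rw [List.foldl_map]
    rfl
  · rfl

lemma pv_ordered (st : List (List Int × Int)) (L S : List (List Int)) :
    st.foldl (fun acc pc =>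
        if PySem.Set.contains acc.2 pc.1 then acc
        else (acc.1 ++ [pc.1], PySem.Set.add acc.2 pc.1)) (L, S)
      = (L ++ pvNew S st, S ++ pvNew S st) := by
  induction st generalizing L S with
  | nil => simp [pvNew]
  | cons pc t ih =>
    rw [List.foldl_cons]
    by_cases hm : pc.1 ∈ S
    · have hcont : PySem.Set.contains S pc.1 = true := by
        simp [PySem.Set.contains, hm]
      rw [show (if PySem.Set.contains (L, S).2 pc.1 then (L, S)
            else ((L, S).1 ++ [pc.1], PySem.Set.add (L, S).2 pc.1)) = (L, S) from by
          simp [PySem.Set.contains, hm]]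
      rw [ih, show pvNew S (pc :: t) = pvNew S t from by simp [pvNew, hm]]
    · have hcont : PySem.Set.contains S pc.1 = false := by
        simp [PySem.Set.contains, hm]
      rw [show (if PySem.Set.contains (L, S).2 pc.1 then (L, S)
            else ((L, S).1 ++ [pc.1], PySem.Set.add (L, S).2 pc.1))
          = (L ++ [pc.1], S ++ [pc.1]) from by
          simp [PySem.Set.contains, PySem.Set.add, hm]]
      rw [ih, pv_new_congr t (show ∀ x, x ∈ S ++ [pc.1] ↔ x ∈ pc.1 :: S from by
          intro x; simp [or_comm]),
        show pvNew S (pc :: t) = pc.1 :: pvNew (pc.1 :: S) t from by simp [pvNew, hm]]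
      simp

lemma pv_q_le_of_mem_new {q : Int} (hq : 0 ≤ q) (qual : List (List Int × Int)) (p : List Int)
    (h : p ∈ pvNew [] (pvStream q qual)) : q ≤ (p.length : Int) := by
  have h1 := pv_mem_new_fst h
  obtain ⟨pc, hpc, rfl⟩ := List.mem_map.mp h1
  obtain ⟨sc, _, hseg⟩ := List.mem_flatMap.mp hpc
  obtain ⟨x, hx, rfl⟩ := List.mem_map.mp hseg
  exact ((pv_mem_pvPref hq sc.1 x).mp hx).1

lemma pv_val_eq_tot (q : Int) (hq : 0 ≤ q) (qual : List (List Int × Int)) (p : List Int)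
    (hp : q ≤ (p.length : Int)) : pvVal qual p = pvTot (pvStream q qual) p := by
  rw [pvTot_stream q hq qual p hp]
  unfold pvVal
  rw [show (fun (s : Int) (sc : List Int × Int) =>
      if PySem.List.slice sc.1 none (some ((p.length : Int))) = p then s + sc.2 else s)
    = (fun s sc => s + (if PySem.List.slice sc.1 none (some ((p.length : Int))) = p then sc.2 else 0))
    from by funext s sc; split_ifs <;> simp]
  rw [PySem.List.foldl_add]
  simp

-- ===== VERDICT (by name: the statement is the Claim_ definition above) =====
theorem filter_and_merge_sequences_spec : Claim_equal_filter_and_merge_sequences := by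
  intro l U M _
  unfold Spec_filter_and_merge_sequences
  have hq : (0 : Int) ≤ (U.length : Int) := by positivity
  -- A's port in fused form
  have e1 : filter_and_merge_sequences l U M
      = (pvExpand (U.length : Int) (pvBuild (U.length : Int) U M l PySem.Dict.empty).items PySem.Dict.empty).items := by
    show (List.foldl (fun f sc =>
        (PySem.List.pyRange 0 ((sc.1.length : Int) - (U.length : Int) + 1) 1).foldl
          (fun f i => f.modify (PySem.List.slice sc.1 none (some ((U.length : Int) + i))) 0 (· + sc.2)) f)
        PySem.Dict.empty (pvBuild (U.length : Int) U M l PySem.Dict.empty).items).items = _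
    congr 1
    unfold pvExpand
    apply List.foldl_ext
    intro f sc _
    exact (pv_addP_eq_portA_inner _ _ _ _).symm
  set q : Int := (U.length : Int) with hqdef
  set qual : List (List Int × Int) := pvQ q U M l with hqual
  set st : List (List Int × Int) := pvStream q qual with hst
  -- B's port in new-keys + per-key-value form
  have e2 : filter_and_merge_sequences_alt l U M
      = (pvNew [] st).map (fun p => (p, pvVal qual p)) := by
    show ((qual.foldl (fun (acc : List (List Int) × PySem.Set (List Int)) sc =>
        (PySem.List.pyRange q ((sc.1.length : Int) + 1) 1).foldl (fun acc en =>
          let p := PySem.List.slice sc.1 none (some en)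
          if PySem.Set.contains acc.2 p then acc else (acc.1 ++ [p], PySem.Set.add acc.2 p)) acc)
      ([], PySem.Set.ofList [])).1.foldl (fun d p => d.insert p (pvVal qual p)) PySem.Dict.empty).items = _
    have hordfold : qual.foldl (fun (acc : List (List Int) × PySem.Set (List Int)) sc =>
        (PySem.List.pyRange q ((sc.1.length : Int) + 1) 1).foldl (fun acc en =>
          let p := PySem.List.slice sc.1 none (some en)
          if PySem.Set.contains acc.2 p then acc else (acc.1 ++ [p], PySem.Set.add acc.2 p)) acc)
      ([], PySem.Set.ofList [])
        = st.foldl (fun acc pc =>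
            if PySem.Set.contains acc.2 pc.1 then acc
            else (acc.1 ++ [pc.1], PySem.Set.add acc.2 pc.1)) ([], []) := by
      rw [hst]
      unfold pvStream
      rw [List.foldl_flatMap]
      apply List.foldl_ext
      intro acc sc _
      rw [List.foldl_map]
      unfold pvPref
      rw [List.foldl_map]
    rw [hordfold, pv_ordered, List.nil_append]
    rw [PySem.Dict.items_foldl_insert_fresh (pvNew [] st) (fun p => p) (fun p => pvVal qual p)
      PySem.Dict.empty (fun a _ => PySem.Dict.contains_empty _) (by simpa using pv_new_nodup [] st)]
    simp [PySem.Dict.empty]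
  rw [e1, pv_main _ _ _ _ _ _ (by simp), e2]
  have hfuse : pvFuse q U M l (pvExpand q (PySem.Dict.empty : PySem.Dict (List Int) Int).items PySem.Dict.empty)
      = st.foldl (fun d pc => pvAdd d pc.1 pc.2) PySem.Dict.empty := by
    rw [hst, hqual]
    exact pv_fuse_stream q U M l
  rw [hfuse, pv_char st PySem.Dict.empty (by simp)]
  rw [show (PySem.Dict.empty : PySem.Dict (List Int) Int).items = [] from rfl,
    show (PySem.Dict.empty : PySem.Dict (List Int) Int).keys = [] from rfl,
    List.map_nil, List.nil_append]
  apply List.map_congr_left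
  intro p hp
  rw [pv_val_eq_tot q hq qual p (pv_q_le_of_mem_new hq qual p hp)]
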